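-- pv_equiv track=rewrite | github.com/lsh23/algorithm-exercise | 다이나믹프로그래밍/동물원.py | DP2
-- ===== SOURCE A (Python) =====
-- from typing import List
--
-- def DP2(N:int) -> int:
--
--     dp: List[List[int]] = [[0]*3for _ in range(N+5)]
--
--     dp[1][0] = 1
--     dp[1][1] = 1
--     dp[1][2] = 1
--
--     for i in range(2,N+1):
--         dp[i][0] = dp[i-1][0] + dp[i-1][1] + dp[i-1][2]
--         dp[i][1] = dp[i-1][0] + dp[i-1][2]
--         dp[i][2] = dp[i-1][0] + dp[i-1][1]
--
--     return dp[N][0] + dp[N][1] + dp[N][2]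
-- ===== SOURCE B (Python) =====
-- def DP2(N: int) -> int:
--     # The per-column answers t(n) = dp[n][0]+dp[n][1]+dp[n][2] satisfy the Pell-type
--     # recurrence t(n) = 2*t(n-1) + t(n-2), so t(N) = 3*P(N) + P(N-1) where P are the
--     # Pell numbers, read off the 2x2 matrix power [[2,1],[1,0]]^N computed by
--     # binary exponentiation.  Column counts below 1 are outside the problem's domain.
--     if N < 1:
--         raise ValueError("N must be a positive column count")
--     a, b, c, d = 1, 0, 0, 1          # accumulator = identity matrix
--     w, x, y, z = 2, 1, 1, 0          # M = [[2,1],[1,0]]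
--     e = N
--     while e > 0:
--         if e & 1:
--             a, b, c, d = a * w + b * y, a * x + b * z, c * w + d * y, c * x + d * z
--         w, x, y, z = w * w + x * y, w * x + x * z, y * w + z * y, y * x + z * z
--         e >>= 1
--     return 3 * b + d
-- ===== Notes on version B (the rewrite author's own statement) =====
-- stated objective: faster
-- what changed: Replaces the O(N)-row 3-state DP table with binary exponentiation of the 2x2 Pell matrix [[2,1],[1,0]] (the answer sequence satisfies t(n)=2t(n-1)+t(n-2)), reading the result as 3*P(N)+P(N-1).
-- outside the precondition, e.g. on DP2(-2): A returns 3, B raises ValueError; on DP2(-1): A returns 0, B raises ValueError; on DP2(0): A returns 0, B raises ValueError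
import Mathlib
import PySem

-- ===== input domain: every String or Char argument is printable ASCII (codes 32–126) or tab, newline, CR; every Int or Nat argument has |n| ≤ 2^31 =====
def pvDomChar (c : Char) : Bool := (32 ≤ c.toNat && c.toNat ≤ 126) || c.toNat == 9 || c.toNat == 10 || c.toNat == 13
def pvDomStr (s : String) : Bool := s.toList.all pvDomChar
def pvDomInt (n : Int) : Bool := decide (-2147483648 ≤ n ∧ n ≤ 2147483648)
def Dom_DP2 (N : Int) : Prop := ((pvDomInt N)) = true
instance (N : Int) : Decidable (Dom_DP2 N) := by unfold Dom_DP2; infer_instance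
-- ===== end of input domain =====

-- B replaces A's O(N)-row 3-state DP table by binary exponentiation of the
-- 2x2 Pell matrix [[2,1],[1,0]] (the answer sequence satisfies t(n) = 2t(n-1)+t(n-2)).

-- ===== PORT A =====
-- dp[i][j] = v  (Python list-element assignment; exact when the indices are in range,
-- which Pre_DP2 guarantees for every access A performs)
def setIJ (dp : List (List Int)) (i j : Int) (v : Int) : List (List Int) :=
  PySem.List.pySetD dp i (PySem.List.pySetD (PySem.List.pyGetD dp i []) j v)

-- dp[i][j]  (exact when the indices are in range, guaranteed by Pre_DP2)
def getIJ (dp : List (List Int)) (i j : Int) : Int :=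
  PySem.List.pyGetD (PySem.List.pyGetD dp i []) j 0

def DP2 (N : Int) : Int :=
  -- dp = [[0]*3 for _ in range(N+5)]
  let dp := List.replicate (N + 5).toNat ([0, 0, 0] : List Int)
  -- dp[1][0] = 1; dp[1][1] = 1; dp[1][2] = 1
  let dp := setIJ dp 1 0 1
  let dp := setIJ dp 1 1 1
  let dp := setIJ dp 1 2 1
  -- for i in range(2, N+1): …
  let dp := (PySem.List.pyRange 2 (N + 1) 1).foldl (fun dp i =>
      let dp := setIJ dp i 0 (getIJ dp (i-1) 0 + getIJ dp (i-1) 1 + getIJ dp (i-1) 2)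
      let dp := setIJ dp i 1 (getIJ dp (i-1) 0 + getIJ dp (i-1) 2)
      let dp := setIJ dp i 2 (getIJ dp (i-1) 0 + getIJ dp (i-1) 1)
      dp) dp
  getIJ dp N 0 + getIJ dp N 1 + getIJ dp N 2

-- ===== PORT B =====
-- the while-loop of Source B: e the remaining exponent, (a,b,c,d) the accumulator matrix,
-- (w,x,y,z) the current square of M; e >>= 1 on e > 0 is e / 2
-- fuel = the initial e bounds the number of iterations (e at least halves each turn),
-- so the fuel never runs out; it only makes the recursion structural
def pellLoop : (fuel e : Nat) → (a b c d w x y z : Int) → Int × Int × Int × Int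
  | 0, _, a, b, c, d, _, _, _, _ => (a, b, c, d)
  | fuel+1, e, a, b, c, d, w, x, y, z =>
    if e = 0 then (a, b, c, d)
    else
      let p := if e % 2 = 1 then (a*w + b*y, a*x + b*z, c*w + d*y, c*x + d*z) else (a, b, c, d)
      pellLoop fuel (e / 2) p.1 p.2.1 p.2.2.1 p.2.2.2 (w*w + x*y) (w*x + x*z) (y*w + z*y) (y*x + z*z)

def DP2_alt (N : Int) : Int :=
  -- if N < 1: raise ValueError  (no value to port; this branch lies outside Pre_DP2)
  if N < 1 then 0
  else
    -- while e > 0 runs at most N.toNat halvings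
    let r := pellLoop N.toNat N.toNat 1 0 0 1 2 1 1 0
    3 * r.2.1 + r.2.2.2

-- ===== PRECONDITION & SPEC =====
-- Pre_ restricts to the function's natural domain, positive column counts N ≥ 1: for
-- N ≤ -3 A raises IndexError, and for N ∈ {-2, -1, 0} A's return value is an accident
-- of its implementation (the never-filled zero row dp[0], or negative-index wraparound),
-- where B raises ValueError.
def Pre_DP2 (N : Int) : Prop := 1 ≤ N
instance (N : Int) : Decidable (Pre_DP2 N) := by unfold Pre_DP2; infer_instance
def pvWitness_DP2 : Int := 3

def Spec_DP2 (N : Int) (out : Int) : Prop := out = DP2_alt N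
instance (N : Int) (out : Int) : Decidable (Spec_DP2 N out) := by unfold Spec_DP2; infer_instance

-- ===== CLAIM (what is proved, stated in full; the proofs are below) =====
def Claim_equal_DP2 : Prop := ∀ (N : Int), Dom_DP2 N → Pre_DP2 N → Spec_DP2 N (DP2 N)

-- ===== LEMMAS AND PROOFS =====

-- t(n): f 0 = 1, f 1 = 3, f (n+2) = 2 f (n+1) + f n
def f : Nat → Int
  | 0 => 1
  | 1 => 3
  | (n+2) => 2 * f (n+1) + f n

-- the row triples of A's table: row i of dp equals u (i-1)
def u : Nat → Int × Int × Int
  | 0 => (1, 1, 1)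
  | (k+1) =>
    let t := u k
    (t.1 + t.2.1 + t.2.2, t.1 + t.2.2, t.1 + t.2.1)

def rowL (t : Int × Int × Int) : List Int := [t.1, t.2.1, t.2.2]

-- the table after rows 1..k have been filled, with pad untouched zero rows at the end
def tbl (k pad : Nat) : List (List Int) :=
  [0, 0, 0] :: ((List.range k).map fun m => rowL (u m)) ++ List.replicate pad ([0, 0, 0] : List Int)

-- 2x2 integer matrices as quadruples (row-major)
def mulQ (p q : Int × Int × Int × Int) : Int × Int × Int × Int :=
  (p.1 * q.1 + p.2.1 * q.2.2.1, p.1 * q.2.1 + p.2.1 * q.2.2.2,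
   p.2.2.1 * q.1 + p.2.2.2 * q.2.2.1, p.2.2.1 * q.2.1 + p.2.2.2 * q.2.2.2)

def idQ : Int × Int × Int × Int := (1, 0, 0, 1)

def qpow (W : Int × Int × Int × Int) : Nat → Int × Int × Int × Int
  | 0 => idQ
  | (n+1) => mulQ (qpow W n) W

lemma mulQ_assoc (p q r : Int × Int × Int × Int) : mulQ (mulQ p q) r = mulQ p (mulQ q r) := by
  simp only [mulQ, Prod.mk.injEq]
  refine ⟨by ring, by ring, by ring, by ring⟩

lemma mulQ_id_right (p : Int × Int × Int × Int) : mulQ p idQ = p := by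
  simp [mulQ, idQ]

lemma mulQ_id_left (p : Int × Int × Int × Int) : mulQ idQ p = p := by
  simp [mulQ, idQ]

lemma qpow_succ_left (W : Int × Int × Int × Int) (n : Nat) :
    mulQ W (qpow W n) = qpow W (n+1) := by
  induction n with
  | zero => simp [qpow, mulQ_id_right, mulQ_id_left]
  | succ n ih =>
    calc mulQ W (qpow W (n+1)) = mulQ W (mulQ (qpow W n) W) := rfl
      _ = mulQ (mulQ W (qpow W n)) W := (mulQ_assoc _ _ _).symm
      _ = mulQ (qpow W (n+1)) W := by rw [ih]
      _ = qpow W (n+1+1) := rfl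

lemma qpow_two_mul (W : Int × Int × Int × Int) (k : Nat) :
    qpow W (2 * k) = qpow (mulQ W W) k := by
  induction k with
  | zero => rfl
  | succ k ih =>
    have h : 2 * (k + 1) = (2 * k + 1) + 1 := by omega
    rw [h, qpow, qpow, ih, mulQ_assoc, qpow]

lemma pellLoop_eq : ∀ (fuel e : Nat), e ≤ fuel → ∀ (a b c d w x y z : Int),
    pellLoop fuel e a b c d w x y z = mulQ (a, b, c, d) (qpow (w, x, y, z) e) := by
  intro fuel
  induction fuel with
  | zero =>
    intro e he a b c d w x y z
    have : e = 0 := by omega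
    subst this
    simp [pellLoop, qpow, mulQ_id_right]
  | succ fuel ih =>
    intro e he a b c d w x y z
    by_cases h0 : e = 0
    · subst h0; simp [pellLoop, qpow, mulQ_id_right]
    · rw [pellLoop]
      simp only [h0, if_false]
      rw [ih (e / 2) (by omega)]
      have hsq : ((w*w + x*y : Int), w*x + x*z, y*w + z*y, y*x + z*z)
          = mulQ (w, x, y, z) (w, x, y, z) := rfl
      rw [hsq, ← qpow_two_mul]
      by_cases hp : e % 2 = 1
      · have hRW : ((a*w + b*y : Int), a*x + b*z, c*w + d*y, c*x + d*z)
            = mulQ (a, b, c, d) (w, x, y, z) := rfl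
        have he2 : 2 * (e / 2) + 1 = e := by omega
        simp only [hp, if_pos]
        rw [hRW, mulQ_assoc, qpow_succ_left, he2]
      · have he2 : 2 * (e / 2) = e := by omega
        simp only [hp, if_false]
        rw [he2]

-- the matrix power reads off f
lemma qpow_f (n : Nat) :
    3 * (qpow (2, 1, 1, 0) n).2.1 + (qpow (2, 1, 1, 0) n).2.2.2 = f n ∧
    3 * (qpow (2, 1, 1, 0) n).1 + (qpow (2, 1, 1, 0) n).2.2.1 = f (n + 1) := by
  induction n with
  | zero => simp [qpow, idQ, f]
  | succ n ih =>
    obtain ⟨h1, h2⟩ := ih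
    constructor
    · rw [qpow]; simp only [mulQ]; ring_nf; ring_nf at h2; omega
    · rw [qpow]; simp only [mulQ]
      show 3 * ((qpow (2,1,1,0) n).1 * 2 + (qpow (2,1,1,0) n).2.1 * 1) +
        ((qpow (2,1,1,0) n).2.2.1 * 2 + (qpow (2,1,1,0) n).2.2.2 * 1) = f (n + 1 + 1)
      rw [show n + 1 + 1 = n + 2 from rfl, f]
      omega

lemma DP2_alt_eq_f (N : Int) (h : 1 ≤ N) : DP2_alt N = f N.toNat := by
  unfold DP2_alt
  rw [if_neg (by omega)]
  show 3 * (pellLoop N.toNat N.toNat 1 0 0 1 2 1 1 0).2.1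
      + (pellLoop N.toNat N.toNat 1 0 0 1 2 1 1 0).2.2.2 = f N.toNat
  rw [pellLoop_eq N.toNat N.toNat le_rfl,
      show ((1, 0, 0, 1) : Int × Int × Int × Int) = idQ from rfl, mulQ_id_left]
  exact (qpow_f N.toNat).1

-- u in terms of f
lemma u_f (k : Nat) : (u k).1 = f k ∧ (u k).2.1 + (u k).2.2 = f (k + 1) - f k := by
  induction k with
  | zero => simp [u, f]
  | succ k ih =>
    obtain ⟨h1, h2⟩ := ih
    have hf : f (k + 1 + 1) = 2 * f (k + 1) + f k := by rw [show k+1+1 = k+2 from rfl, f]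
    refine ⟨?_, ?_⟩
    · show (u k).1 + (u k).2.1 + (u k).2.2 = f (k + 1)
      omega
    · show ((u k).1 + (u k).2.2) + ((u k).1 + (u k).2.1) = f (k + 1 + 1) - f (k + 1)
      calc ((u k).1 + (u k).2.2) + ((u k).1 + (u k).2.1)
          = 2 * (u k).1 + ((u k).2.1 + (u k).2.2) := by ring
        _ = 2 * f k + (f (k + 1) - f k) := by rw [h1, h2]
        _ = f (k + 1 + 1) - f (k + 1) := by rw [hf]; ring

-- the fold body of DP2, named for the proofs (definitionally the lambda in DP2)
def stepF (dp : List (List Int)) (i : Int) : List (List Int) :=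
  let dp := setIJ dp i 0 (getIJ dp (i-1) 0 + getIJ dp (i-1) 1 + getIJ dp (i-1) 2)
  let dp := setIJ dp i 1 (getIJ dp (i-1) 0 + getIJ dp (i-1) 2)
  let dp := setIJ dp i 2 (getIJ dp (i-1) 0 + getIJ dp (i-1) 1)
  dp

lemma pyGetD3_0 (a b c d : Int) : PySem.List.pyGetD [a, b, c] (0 : Int) d = a := rfl
lemma pyGetD3_1 (a b c d : Int) : PySem.List.pyGetD [a, b, c] (1 : Int) d = b := rfl
lemma pyGetD3_2 (a b c d : Int) : PySem.List.pyGetD [a, b, c] (2 : Int) d = c := rfl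
lemma pySetD3_0 (a b c v : Int) : PySem.List.pySetD [a, b, c] (0 : Int) v = [v, b, c] := rfl
lemma pySetD3_1 (a b c v : Int) : PySem.List.pySetD [a, b, c] (1 : Int) v = [a, v, c] := rfl
lemma pySetD3_2 (a b c v : Int) : PySem.List.pySetD [a, b, c] (2 : Int) v = [a, b, v] := rfl

lemma getD_append_at {α : Type} (P R : List α) (x d : α) (m : Nat) (h : m = P.length) :
    (P ++ x :: R).getD m d = x := by
  subst h
  rw [List.getD_eq_getElem?_getD, List.getElem?_append_right le_rfl]
  simp

lemma set_append_at {α : Type} (P R : List α) (x v : α) (m : Nat) (h : m = P.length) :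
    (P ++ x :: R).set m v = P ++ v :: R := by
  subst h
  rw [List.set_append]
  simp

lemma tbl_read (k pad m : Nat) (h1 : 1 ≤ m) (h2 : m ≤ k) :
    (tbl k pad).getD m [] = rowL (u (m - 1)) := by
  unfold tbl
  obtain ⟨m', rfl⟩ : ∃ m', m = m' + 1 := ⟨m - 1, by omega⟩
  rw [List.getD_eq_getElem?_getD, List.getElem?_append_left (by simp; omega),
      List.getElem?_cons_succ, List.getElem?_map, List.getElem?_range (by omega)]
  simp

lemma tbl_split (k pad : Nat) :
    tbl k (pad + 1)
      = (([0, 0, 0] : List Int) :: ((List.range k).map fun m => rowL (u m)))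
          ++ [0, 0, 0] :: List.replicate pad ([0, 0, 0] : List Int) := by
  simp [tbl, List.replicate_succ]

lemma step_tbl (k pad : Nat) (hk : 1 ≤ k) :
    stepF (tbl k (pad + 1)) ((k : Int) + 1) = tbl (k + 1) pad := by
  have hcast : ((k : Int) + 1) = (((k + 1 : Nat) : Int)) := by push_cast; ring
  have hcast0 : ((k : Int) + 1 - 1) = ((k : Nat) : Int) := by push_cast; ring
  have hread : ∀ (R : List (List Int)),
      ((([0, 0, 0] : List Int) :: ((List.range k).map fun m => rowL (u m)) ++ R).getD k [])
        = rowL (u (k - 1)) := by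
    intro R
    obtain ⟨k', rfl⟩ : ∃ k', k = k' + 1 := ⟨k - 1, by omega⟩
    rw [List.getD_eq_getElem?_getD, List.getElem?_append_left (by simp),
        List.getElem?_cons_succ, List.getElem?_map, List.getElem?_range (by omega)]
    simp
  have hget : ∀ (x : List Int) (R : List (List Int)),
      (((([0, 0, 0] : List Int) :: ((List.range k).map fun m => rowL (u m))) ++ x :: R).getD (k + 1) [])
        = x := fun x R => getD_append_at _ _ _ _ _ (by simp)
  have hset : ∀ (x v : List Int) (R : List (List Int)),
      (((([0, 0, 0] : List Int) :: ((List.range k).map fun m => rowL (u m))) ++ x :: R).set (k + 1) v)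
        = (([0, 0, 0] : List Int) :: ((List.range k).map fun m => rowL (u m))) ++ v :: R :=
    fun x v R => set_append_at _ _ _ _ _ (by simp)
  unfold stepF setIJ getIJ
  rw [hcast0, hcast, tbl_split]
  simp only [PySem.List.pyGetD_natCast, PySem.List.pySetD_natCast]
  simp only [hread, hget, hset]
  simp only [rowL, pyGetD3_0, pyGetD3_1, pyGetD3_2, pySetD3_0, pySetD3_1, pySetD3_2]
  rw [tbl, List.range_succ, List.map_append]
  have hk1 : u k = ((u (k-1)).1 + (u (k-1)).2.1 + (u (k-1)).2.2,
                    (u (k-1)).1 + (u (k-1)).2.2, (u (k-1)).1 + (u (k-1)).2.1) := by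
    conv_lhs => rw [show k = (k-1)+1 from by omega]
    rw [u]
  simp [rowL, hk1, List.cons_append, List.append_assoc]

lemma setIJ_cons1 (x r : List Int) (rest : List (List Int)) (j v : Int) :
    setIJ (x :: r :: rest) 1 j v = x :: PySem.List.pySetD r j v :: rest := by
  unfold setIJ
  rw [PySem.List.pyGetD_ofNat', PySem.List.pySetD_of_nonneg _ _ (by norm_num)]
  rfl

lemma fold_tbl (m : Nat) : ∀ (k pad : Nat), 1 ≤ k → m ≤ pad →
    List.foldl stepF (tbl k pad) (PySem.List.pyRange ((k : Int) + 1) ((k : Int) + 1 + m) 1)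
      = tbl (k + m) (pad - m) := by
  induction m with
  | zero =>
    intro k pad hk hm
    rw [show ((k : Int) + 1 + (0 : Nat)) = (k : Int) + 1 from by push_cast; ring]
    rw [PySem.List.pyRange_one_eq_nil le_rfl]
    simp
  | succ m ih =>
    intro k pad hk hm
    rw [PySem.List.pyRange_one_cons (by push_cast; omega)]
    rw [List.foldl_cons]
    rw [show pad = (pad - 1) + 1 from by omega, step_tbl k (pad - 1) hk]
    have hb : ((k : Int) + 1 + 1) = (((k + 1 : Nat) : Int)) + 1 := by push_cast; ring
    have he : ((k : Int) + 1 + ((m + 1 : Nat) : Int)) = (((k + 1 : Nat) : Int)) + 1 + (m : Nat) := by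
      push_cast; ring
    rw [hb, he, ih (k + 1) (pad - 1) (by omega) (by omega)]
    rw [show k + 1 + m = k + (m + 1) from by omega, show pad - 1 - m = pad - (m + 1) from by omega]
    congr 1
    omega

lemma init_tbl (n : Nat) :
    setIJ (setIJ (setIJ (List.replicate (n + 5) ([0, 0, 0] : List Int)) 1 0 1) 1 1 1) 1 2 1
      = tbl 1 (n + 3) := by
  rw [show n + 5 = (n + 3) + 1 + 1 from by omega, List.replicate_succ, List.replicate_succ]
  rw [setIJ_cons1, setIJ_cons1, setIJ_cons1]
  rw [pySetD3_0, pySetD3_1, pySetD3_2]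
  rfl

lemma DP2_eq (N : Int) :
    DP2 N = getIJ (List.foldl stepF
        (setIJ (setIJ (setIJ (List.replicate (N + 5).toNat ([0, 0, 0] : List Int)) 1 0 1) 1 1 1) 1 2 1)
        (PySem.List.pyRange 2 (N + 1) 1)) N 0 + getIJ (List.foldl stepF
        (setIJ (setIJ (setIJ (List.replicate (N + 5).toNat ([0, 0, 0] : List Int)) 1 0 1) 1 1 1) 1 2 1)
        (PySem.List.pyRange 2 (N + 1) 1)) N 1 + getIJ (List.foldl stepF
        (setIJ (setIJ (setIJ (List.replicate (N + 5).toNat ([0, 0, 0] : List Int)) 1 0 1) 1 1 1) 1 2 1)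
        (PySem.List.pyRange 2 (N + 1) 1)) N 2 := rfl

theorem DP2_spec : Claim_equal_DP2 := by
  intro N _ hpre
  unfold Pre_DP2 at hpre
  unfold Spec_DP2
  obtain ⟨n, hn, rfl⟩ : ∃ n : Nat, 1 ≤ n ∧ N = (n : Int) :=
    ⟨N.toNat, by omega, by omega⟩
  rw [DP2_alt_eq_f _ (by omega), DP2_eq]
  have h5 : ((n : Int) + 5).toNat = n + 5 := by omega
  rw [h5, init_tbl n]
  have hr : PySem.List.pyRange 2 ((n : Int) + 1) 1
      = PySem.List.pyRange (((1 : Nat) : Int) + 1) (((1 : Nat) : Int) + 1 + ((n - 1 : Nat) : Int)) 1 := by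
    congr 1 <;> push_cast <;> omega
  rw [hr, fold_tbl (n - 1) 1 (n + 3) le_rfl (by omega)]
  rw [show 1 + (n - 1) = n from by omega]
  unfold getIJ
  simp only [PySem.List.pyGetD_natCast]
  rw [tbl_read n _ n (by omega) le_rfl]
  unfold rowL
  rw [pyGetD3_0, pyGetD3_1, pyGetD3_2]
  have hu := u_f (n - 1)
  have hn1 : (n - 1) + 1 = n := by omega
  rw [hn1] at hu
  have : (n : Int).toNat = n := by omega
  rw [this]
  omega
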